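-- pv_equiv track=rewrite | github.com/Mark1002/ds_algo_practice | stack/problem1.py | solution
-- ===== SOURCE A (Python) =====
-- def solution(S):
--     stack = []
--     for char in S:
--         if len(stack) > 0:
--             top = stack[-1]
--             if (top == "B" and char == "A") or (top == "A" and char == "B"):
--                 stack.pop()
--                 continue
--             elif (top == "C" and char == "D") or (top == "D" and char == "C"):
--                 stack.pop()
--                 continue
--         stack.append(char)
--     return "".join(stack)
-- ===== SOURCE B (Python) =====
-- def solution(S):
--     PAIR = {'A': 'B', 'B': 'A', 'C': 'D', 'D': 'C'}
--
--     def merge(a, b):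
--         i, j = len(a), 0
--         while i > 0 and j < len(b) and PAIR.get(a[i - 1]) == b[j]:
--             i -= 1
--             j += 1
--         return a[:i] + b[j:]
--
--     def reduce(t):
--         if len(t) <= 1:
--             return t
--         mid = len(t) // 2
--         return merge(reduce(t[:mid]), reduce(t[mid:]))
--
--     return reduce(S)
-- ===== Notes on version B (the rewrite author's own statement) =====
-- stated objective: alternative
-- what changed: Replaces A's single left-to-right stack pass by a divide-and-conquer reduction: each half of the string is reduced independently and the two reduced halves are merged by cancelling matching A/B and C/D pairs across the boundary; correctness rests on the confluence of the cancellation rewriting (proved via a right-fold normal form).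
import Mathlib
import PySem

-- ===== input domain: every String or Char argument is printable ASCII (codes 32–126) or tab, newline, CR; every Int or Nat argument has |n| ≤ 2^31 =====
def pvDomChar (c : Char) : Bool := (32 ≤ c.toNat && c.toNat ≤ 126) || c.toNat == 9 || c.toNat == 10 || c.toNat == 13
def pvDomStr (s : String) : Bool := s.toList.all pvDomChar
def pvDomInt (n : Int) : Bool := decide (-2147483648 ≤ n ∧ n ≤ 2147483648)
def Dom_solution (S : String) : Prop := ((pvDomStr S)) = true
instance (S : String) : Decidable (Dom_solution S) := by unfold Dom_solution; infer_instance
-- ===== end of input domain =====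

-- B replaces A's single left-to-right stack pass by a divide-and-conquer: reduce both halves,
-- then cancel matching pairs across the boundary (objective: alternative algorithm, same results).


-- ===== PORT A =====
-- loop body of A: one char pushed onto / cancelled against the stack (top = last element)
def solutionStep (stack : List Char) (char : Char) : List Char :=
  if stack.length > 0 then
    let top := stack.getLast!      -- stack[-1]; guarded by len(stack) > 0, so exact
    if (top = 'B' ∧ char = 'A') ∨ (top = 'A' ∧ char = 'B') then stack.dropLast
    else if (top = 'C' ∧ char = 'D') ∨ (top = 'D' ∧ char = 'C') then stack.dropLast
    else stack ++ [char]
  else stack ++ [char]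

def solution (S : String) : String := String.mk (S.toList.foldl solutionStep [])

-- ===== PORT B =====
-- PAIR = {'A':'B','B':'A','C':'D','D':'C'}
def pairB : PySem.Dict Char Char := PySem.Dict.ofList [('A','B'),('B','A'),('C','D'),('D','C')]

-- PAIR.get(x) == y  (Python None == y is False since y is a char)
def cancelsB (x y : Char) : Bool := pairB.get? x == some y

-- the while loop of merge: returns the final (i, j); indexing a[i-1], b[j] is guarded, so getD is exact
def mergeLoop (a b : List Char) (i j : Nat) : Nat × Nat :=
  if 0 < i ∧ j < b.length ∧ cancelsB (a.getD (i-1) ' ') (b.getD j ' ') = true then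
    mergeLoop a b (i-1) (j+1)
  else (i, j)
termination_by i
decreasing_by omega

def mergeB (a b : List Char) : List Char :=
  let p := mergeLoop a b a.length 0
  a.take p.1 ++ b.drop p.2

def reduceB (l : List Char) : List Char :=
  if l.length ≤ 1 then l
  else
    mergeB (reduceB (l.take (l.length / 2))) (reduceB (l.drop (l.length / 2)))
termination_by l.length
decreasing_by
  · simp; omega
  · simp; omega

def solution_alt (S : String) : String := String.mk (reduceB S.toList)

-- ===== PRECONDITION & SPEC =====
def Spec_solution (S : String) (out : String) : Prop := out = solution_alt S
instance (S : String) (out : String) : Decidable (Spec_solution S out) := by unfold Spec_solution; infer_instance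

-- ===== CLAIM (what is proved, stated in full; the proofs are below) =====
def Claim_equal_solution : Prop := ∀ (S : String), Dom_solution S → Spec_solution S (solution S)

-- ===== LEMMAS AND PROOFS =====

-- the cancellation relation both programs implement
def cancel (a b : Char) : Bool :=
  (a == 'A' && b == 'B') || (a == 'B' && b == 'A') || (a == 'C' && b == 'D') || (a == 'D' && b == 'C')

-- proof-side normal form: a right fold pushing chars onto a reduced suffix
def push (c : Char) (r : List Char) : List Char :=
  match r with
  | [] => [c]
  | d :: ds => if cancel c d then ds else c :: d :: ds

def reduce : List Char → List Char
  | [] => []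
  | c :: cs => push c (reduce cs)

-- irreducible: no adjacent cancelling pair
def Irr (l : List Char) : Prop := l.IsChain (fun a b => cancel a b = false)

theorem cancelsB_eq (x y : Char) : cancelsB x y = cancel x y := by
  have hp : pairB = PySem.Dict.mk [('A','B'),('B','A'),('C','D'),('D','C')] := by rfl
  rw [cancelsB, hp, cancel]
  simp only [PySem.Dict.get?_mk_cons]
  by_cases h1 : ('A':Char) = x <;> by_cases h2 : ('B':Char) = x <;>
    by_cases h3 : ('C':Char) = x <;> by_cases h4 : ('D':Char) = x <;>
    subst_vars <;> simp_all [BEq.comm, PySem.Dict.get?] <;>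
    (try rw [if_neg (fun h => h1 h.symm), if_neg (fun h => h2 h.symm),
             if_neg (fun h => h3 h.symm), if_neg (fun h => h4 h.symm)]) <;>
    simp <;>
    exact ⟨⟨⟨fun h => (h1 h.symm).elim, fun h => (h2 h.symm).elim⟩,
      fun h => (h3 h.symm).elim⟩, fun h => (h4 h.symm).elim⟩

theorem cancel_unique {t c d : Char} (h1 : cancel t c = true) (h2 : cancel c d = true) : d = t := by
  simp only [cancel, Bool.or_eq_true, Bool.and_eq_true, beq_iff_eq] at h1 h2
  rcases h1 with ⟨ha, hb⟩|⟨ha, hb⟩|⟨ha, hb⟩|⟨ha, hb⟩ <;>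
    rcases h2 with ⟨hc, hd⟩|⟨hc, hd⟩|⟨hc, hd⟩|⟨hc, hd⟩ <;> subst_vars <;> first | rfl | simp_all

theorem irr_push {c : Char} {r : List Char} (h : Irr r) : Irr (push c r) := by
  cases r with
  | nil => simp [push, Irr]
  | cons d ds =>
    simp only [push]
    split
    · exact h.of_cons
    · next hc => exact List.isChain_cons_cons.mpr ⟨by simpa using hc, h⟩

theorem irr_reduce (l : List Char) : Irr (reduce l) := by
  induction l with
  | nil => simp [reduce, Irr]
  | cons c cs ih => exact irr_push ih

theorem reduce_irr {l : List Char} (h : Irr l) : reduce l = l := by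
  induction l with
  | nil => rfl
  | cons c cs ih =>
    have : reduce cs = cs := ih h.of_cons
    simp only [reduce, this]
    cases cs with
    | nil => rfl
    | cons d ds =>
      have hc : cancel c d = false := (List.isChain_cons_cons.mp h).1
      simp [push, hc]

theorem push_push {t c : Char} {r : List Char} (h : Irr r) (hc : cancel t c = true) :
    push t (push c r) = r := by
  cases r with
  | nil => simp [push, hc]
  | cons d ds =>
    by_cases hcd : cancel c d = true
    · have hdt : d = t := cancel_unique hc hcd
      subst hdt
      simp only [push, hcd, if_true]
      cases ds with
      | nil => rfl
      | cons e es =>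
        have : cancel d e = false := (List.isChain_cons_cons.mp h).1
        simp [this]
    · simp [push, hcd, hc]

theorem reduce_cancel {t c : Char} (hc : cancel t c = true) (s xs : List Char) :
    reduce (s ++ t :: c :: xs) = reduce (s ++ xs) := by
  induction s with
  | nil => simpa [reduce] using push_push (irr_reduce xs) hc
  | cons a s ih => simp [reduce, ih]

theorem reduce_append (x y : List Char) : reduce (x ++ y) = List.foldr push (reduce y) x := by
  induction x with
  | nil => rfl
  | cons a x ih => simp [reduce, ih]

theorem push_reduce_append {c : Char} {r : List Char} (h : Irr r) (y : List Char) :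
    push c (reduce (r ++ y)) = reduce (push c r ++ y) := by
  cases r with
  | nil => simp [push, reduce]
  | cons d ds =>
    by_cases hcd : cancel c d = true
    · simp only [push, hcd, if_true]
      simpa [reduce] using push_push (irr_reduce (ds ++ y)) hcd
    · simp [push, hcd, reduce]

theorem reduce_reduce_append (x y : List Char) : reduce (x ++ y) = reduce (reduce x ++ y) := by
  induction x with
  | nil => rfl
  | cons c x ih =>
    calc reduce (c :: x ++ y) = push c (reduce (x ++ y)) := by simp [reduce]
      _ = push c (reduce (reduce x ++ y)) := by rw [ih]
      _ = reduce (push c (reduce x) ++ y) := push_reduce_append (irr_reduce x) y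
      _ = reduce (reduce (c :: x) ++ y) := by simp [reduce]

-- pushing an already-irreducible prefix causes no cancellation
theorem foldr_push_irr {s r : List Char} (h : Irr (s ++ r)) : List.foldr push r s = s ++ r := by
  induction s with
  | nil => rfl
  | cons a s ih =>
    have ht : List.foldr push r s = s ++ r := ih (by simpa using h.of_cons)
    rw [List.foldr_cons, ht]
    cases hsr : s ++ r with
    | nil => simp [push, hsr]
    | cons d ds =>
      have hirr : Irr (a :: d :: ds) := by
        have := h; simp only [Irr, List.cons_append] at this ⊢; rwa [hsr] at this
      have : cancel a d = false := (List.isChain_cons_cons.mp hirr).1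
      simp [push, this, hsr]

theorem mergeLoop_fst_le (a b : List Char) (i j : Nat) : (mergeLoop a b i j).1 ≤ i := by
  induction i using Nat.strong_induction_on generalizing j with
  | _ i ih =>
    rw [mergeLoop]
    split
    · next hcond => exact le_trans (ih (i-1) (by omega) (j+1)) (by omega)
    · exact le_refl i

theorem mergeLoop_shift (s : List Char) (t c : Char) (bs : List Char) (i j : Nat)
    (hi : i ≤ s.length) :
    mergeLoop (s ++ [t]) (c :: bs) i (j+1) =
      ((mergeLoop s bs i j).1, (mergeLoop s bs i j).2 + 1) := by
  induction i using Nat.strong_induction_on generalizing j with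
  | _ i ih =>
    have hgd : 0 < i → ((s ++ [t]).getD (i-1) ' ') = s.getD (i-1) ' ' := by
      intro h0; exact List.getD_append s [t] ' ' (i-1) (by omega)
    rw [mergeLoop]
    by_cases hcond : 0 < i ∧ j < bs.length ∧ cancelsB (s.getD (i-1) ' ') (bs.getD j ' ') = true
    · obtain ⟨h0, hj, hcb⟩ := hcond
      have hb1 : (c :: bs).getD (j+1) ' ' = bs.getD j ' ' := rfl
      rw [if_pos ⟨h0, by simp only [List.length_cons]; omega,
          by rw [hgd h0, hb1]; exact hcb⟩]
      rw [ih (i-1) (by omega) (j+1) (by omega)]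
      conv_rhs => rw [mergeLoop, if_pos ⟨h0, hj, hcb⟩]
    · rw [if_neg ?hn]
      case hn =>
        rintro ⟨h0, hj, hcb⟩
        simp only [List.length_cons] at hj
        have hb1 : (c :: bs).getD (j+1) ' ' = bs.getD j ' ' := rfl
        rw [hgd h0, hb1] at hcb
        exact hcond ⟨h0, by omega, hcb⟩
      conv_rhs => rw [mergeLoop, if_neg hcond]

theorem mergeB_nil_left (b : List Char) : mergeB [] b = b := by
  simp [mergeB, mergeLoop]

theorem mergeB_concat_cons (s : List Char) (t c : Char) (bs : List Char) :
    mergeB (s ++ [t]) (c :: bs) = if cancel t c then mergeB s bs else s ++ [t] ++ (c :: bs) := by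
  have hlen : (s ++ [t]).length = s.length + 1 := by simp
  have hget : (s ++ [t]).getD (s.length + 1 - 1) ' ' = t := by simp
  rw [mergeB]
  rw [hlen, mergeLoop]
  by_cases hc : cancel t c = true
  · rw [if_pos ⟨by omega, by simp, by simpa [hget, cancelsB_eq] using hc⟩]
    rw [show s.length + 1 - 1 = s.length by omega,
        mergeLoop_shift s t c bs s.length 0 (le_refl _)]
    have h1 := mergeLoop_fst_le s bs s.length 0
    rw [if_pos hc, mergeB]
    dsimp only
    rw [List.take_append_of_le_length h1, List.drop_succ_cons]
  · rw [if_neg (by rintro ⟨-, -, hcb⟩; exact hc (by simpa [hget, cancelsB_eq] using hcb))]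
    rw [if_neg hc, List.drop_zero, ← hlen, List.take_length]

theorem mergeB_nil_right (a : List Char) : mergeB a [] = a := by
  rw [mergeB, mergeLoop]
  simp

theorem mergeB_foldr (a : List Char) : ∀ b : List Char, Irr a → Irr b →
    mergeB a b = List.foldr push b a := by
  induction a using List.reverseRecOn with
  | nil => intro b _ _; simp [mergeB_nil_left]
  | append_singleton s t ih =>
    intro b ha hb
    cases b with
    | nil =>
      rw [mergeB_nil_right]
      have := foldr_push_irr (s := s ++ [t]) (r := []) (by simpa using ha)
      simpa using this.symm
    | cons c bs =>
      rw [mergeB_concat_cons, List.foldr_append]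
      simp only [List.foldr_cons, List.foldr_nil]
      by_cases hc : cancel t c = true
      · have hps : push t (c :: bs) = bs := by simp [push, hc]
        rw [if_pos hc, hps]
        exact ih bs (ha.prefix ⟨[t], rfl⟩) hb.of_cons
      · have hps : push t (c :: bs) = t :: c :: bs := by simp [push, hc]
        rw [if_neg hc, hps]
        have hirr : Irr (s ++ t :: c :: bs) := by
          rw [show s ++ t :: c :: bs = (s ++ [t]) ++ (c :: bs) by simp]
          refine List.isChain_append.mpr ⟨ha, hb, ?_⟩
          intro x hx y hy
          simp at hx hy
          subst hx; subst hy
          simpa using hc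
        rw [foldr_push_irr hirr]
        simp

theorem reduceB_eq (l : List Char) : reduceB l = reduce l := by
  induction l using reduceB.induct with
  | case1 l h1 =>
    match l, h1 with
    | [], _ => rw [reduceB]; rfl
    | [a], _ => rw [reduceB]; rfl
  | case2 l h1 ih1 ih2 =>
    rw [reduceB, if_neg h1, ih1, ih2,
        mergeB_foldr _ _ (irr_reduce _) (irr_reduce _), ← reduce_append,
        ← reduce_reduce_append, List.take_append_drop]

-- A's branch pair is exactly `cancel top char`
theorem solutionStep_concat (s : List Char) (t c : Char) :
    solutionStep (s ++ [t]) c = if cancel t c then s else (s ++ [t]) ++ [c] := by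
  have hlast : (s ++ [t]).getLast! = t := by
    cases s with
    | nil => rfl
    | cons x xs => simp [List.getLast!]
  simp only [solutionStep, List.length_append, List.length_cons]
  rw [if_pos (by omega)]
  simp only [hlast, List.dropLast_concat]
  by_cases h1 : (t = 'B' ∧ c = 'A') ∨ (t = 'A' ∧ c = 'B')
  · rw [if_pos h1, if_pos (show cancel t c = true by
      rcases h1 with ⟨rfl, rfl⟩ | ⟨rfl, rfl⟩ <;> rfl)]
  · rw [if_neg h1]
    by_cases h2 : (t = 'C' ∧ c = 'D') ∨ (t = 'D' ∧ c = 'C')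
    · rw [if_pos h2, if_pos (show cancel t c = true by
        rcases h2 with ⟨rfl, rfl⟩ | ⟨rfl, rfl⟩ <;> rfl)]
    · have hnc : ¬ cancel t c = true := by
        intro hc
        simp only [cancel, Bool.or_eq_true, Bool.and_eq_true, beq_iff_eq] at hc
        rcases hc with ((h|h)|h)|h <;> simp_all
      rw [if_neg h2, if_neg hnc]

theorem foldA (xs : List Char) : ∀ st : List Char, Irr st →
    List.foldl solutionStep st xs = reduce (st ++ xs) := by
  induction xs with
  | nil => intro st h; simpa using (reduce_irr h).symm
  | cons c xs ih =>
    intro st hst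
    rw [List.foldl_cons]
    rcases st.eq_nil_or_concat with rfl | ⟨s, t, rfl⟩
    · have : solutionStep [] c = [c] := rfl
      rw [this, ih [c] (by simp [Irr])]
      rfl
    · simp only [List.concat_eq_append] at hst ⊢
      rw [solutionStep_concat]
      by_cases hc : cancel t c = true
      · rw [if_pos hc, ih s (hst.prefix ⟨[t], rfl⟩)]
        rw [show (s ++ [t]) ++ c :: xs = s ++ t :: c :: xs by simp]
        exact (reduce_cancel hc s xs).symm
      · have hirr : Irr ((s ++ [t]) ++ [c]) := by
          refine List.isChain_append.mpr ⟨hst, by simp, ?_⟩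
          intro x hx y hy
          simp at hx hy
          subst hx; subst hy
          simpa using hc
        rw [if_neg hc, ih _ hirr]
        simp

-- ===== VERDICT (by name: the statement is the Claim_ definition above) =====
theorem solution_spec : Claim_equal_solution := by
  intro S _
  unfold Spec_solution solution solution_alt
  rw [foldA S.toList [] (by simp [Irr]), reduceB_eq]
  rfl
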